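-- pv_equiv track=rewrite | github.com/BossWT/CUComProg | P2/P2_03.py | is_heterogram
-- ===== SOURCE A (Python) =====
-- def is_heterogram(s):
--     d = {}
--     s = s.lower()
--     for c in s:
--         if c.isalpha():
--             if c in d:
--                 return False
--             else:
--                 d[c] = 1
--     return True
-- ===== SOURCE B (Python) =====
-- def is_heterogram(s):
--     letters = [c for c in s.lower() if c.isalpha()]
--     return len(set(letters)) == len(letters)
-- ===== Notes on version B (the rewrite author's own statement) =====
-- stated objective: simpler
-- what changed: B replaces A's incremental seen-dict loop with early return by a single filter of the alphabetic letters followed by a cardinality comparison len(set(letters)) == len(letters).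
import Mathlib
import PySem

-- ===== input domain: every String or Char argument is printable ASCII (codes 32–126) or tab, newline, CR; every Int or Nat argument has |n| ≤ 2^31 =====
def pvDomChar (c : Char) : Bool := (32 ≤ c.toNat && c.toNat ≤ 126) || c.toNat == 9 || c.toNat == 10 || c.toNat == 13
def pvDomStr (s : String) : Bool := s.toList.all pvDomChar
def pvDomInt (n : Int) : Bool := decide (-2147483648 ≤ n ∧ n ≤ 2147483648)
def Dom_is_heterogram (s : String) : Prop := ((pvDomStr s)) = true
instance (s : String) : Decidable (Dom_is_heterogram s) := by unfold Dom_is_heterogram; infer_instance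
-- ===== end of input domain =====

-- B is a different decomposition: filter the letters once, compare cardinalities,
-- instead of A's incremental seen-dict with early return. Equivalence is exact (no Pre_).

-- ===== PORT A =====
-- the 'for c in s: …' loop with the dict d and the early 'return False'
def isHeterogramLoop : PySem.Dict Char Int → List Char → Bool
  | _, [] => true
  | d, c :: rest =>
    if PySem.Chars.isalpha c then
      if d.contains c then false
      else isHeterogramLoop (d.insert c 1) rest
    else isHeterogramLoop d rest

def is_heterogram (s : String) : Bool :=
  isHeterogramLoop PySem.Dict.empty (PySem.Chars.lower s.toList)

-- ===== PORT B =====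
def is_heterogram_alt (s : String) : Bool :=
  let letters := (PySem.Chars.lower s.toList).filter PySem.Chars.isalpha
  PySem.Set.len (PySem.Set.ofList letters) == (letters.length : Int)

-- ===== PRECONDITION & SPEC =====
def Spec_is_heterogram (s : String) (out : Bool) : Prop := out = is_heterogram_alt s
instance (s : String) (out : Bool) : Decidable (Spec_is_heterogram s out) := by unfold Spec_is_heterogram; infer_instance

-- ===== CLAIM (what is proved, stated in full; the proofs are below) =====
def Claim_equal_is_heterogram : Prop := ∀ (s : String), Dom_is_heterogram s → Spec_is_heterogram s (is_heterogram s)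

-- ===== LEMMAS AND PROOFS =====

-- set(xs) is a sublist of xs
theorem pv_ofList_sublist {α : Type} [BEq α] [LawfulBEq α] (xs : List α) :
    (PySem.Set.ofList xs).Sublist xs := by
  induction xs with
  | nil => simp [PySem.Set.ofList_nil]
  | cons x xs ih =>
    rw [PySem.Set.ofList_cons]
    exact List.Sublist.cons₂ x ((List.filter_sublist).trans ih)

-- len(set(xs)) = len(xs)  iff  xs has no duplicates
theorem pv_len_ofList_eq_iff {α : Type} [BEq α] [LawfulBEq α] (xs : List α) :
    ((PySem.Set.ofList xs).length = xs.length) ↔ xs.Nodup := by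
  constructor
  · intro h
    have heq := (pv_ofList_sublist xs).eq_of_length h
    exact heq ▸ PySem.Set.nodup_ofList xs
  · intro h
    rw [PySem.Set.ofList_eq_self_of_nodup xs h]

-- characterisation of A's loop: true iff the remaining letters are distinct and unseen
theorem pv_loopA (l : List Char) (d : PySem.Dict Char Int) :
    isHeterogramLoop d l = true ↔
      ((l.filter PySem.Chars.isalpha).Nodup ∧
        ∀ c ∈ l.filter PySem.Chars.isalpha, d.contains c = false) := by
  induction l generalizing d with
  | nil => simp [isHeterogramLoop]
  | cons c l ih =>
    by_cases hc : PySem.Chars.isalpha c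
    · by_cases hd : d.contains c = true
      · simp only [isHeterogramLoop, hc, if_true, hd, List.filter_cons]
        constructor
        · intro h; cases h
        · rintro ⟨-, hall⟩
          have := hall c (List.mem_cons_self ..)
          rw [hd] at this; cases this
      · have hdf : d.contains c = false := by simpa using hd
        simp only [isHeterogramLoop, hc, if_true, hdf, Bool.false_eq_true, if_false, ih,
          List.filter_cons, List.nodup_cons, List.mem_cons]
        constructor
        · rintro ⟨hn, hall⟩
          have hcm : c ∉ l.filter PySem.Chars.isalpha := by
            intro hm
            have := hall c hm
            simp at this
          refine ⟨⟨hcm, hn⟩, ?_⟩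
          rintro x (rfl | hx)
          · exact hdf
          · have := hall x hx
            simp [PySem.Dict.contains_insert] at this
            exact this.2
        · rintro ⟨⟨hcm, hn⟩, hall⟩
          refine ⟨hn, fun x hx => ?_⟩
          have hxc : x ≠ c := fun h => hcm (h ▸ hx)
          have := hall x (Or.inr hx)
          simp [PySem.Dict.contains_insert, hxc, this]
    · simp only [isHeterogramLoop, hc, Bool.false_eq_true, if_false, ih, List.filter_cons]

-- ===== VERDICT (by name: the statement is the Claim_ definition above) =====
theorem is_heterogram_spec : Claim_equal_is_heterogram := by
  intro s _
  unfold Spec_is_heterogram is_heterogram is_heterogram_alt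
  rw [Bool.eq_iff_iff, pv_loopA]
  simp [PySem.Dict.contains_empty, PySem.Set.len, pv_len_ofList_eq_iff]
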